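-- pv_equiv track=rewrite | github.com/ThejanB/Project-Euler | 146.py | admissible_residues
-- ===== SOURCE A (Python) =====
-- from math import prod
--
-- WHEEL_PRIMES = (2, 3, 5, 7, 11, 13)
--
-- WHEEL_MOD = prod(WHEEL_PRIMES)
--
-- def admissible_residues(offsets):
--
--     A = list(offsets)
--     good = []
--     for r in range(WHEEL_MOD):
--         ok = True
--         for p in WHEEL_PRIMES:
--             rp2 = (r * r) % p
--             for a in A:
--                 if (rp2 + a) % p == 0:
--                     ok = False
--                     break
--             if not ok:
--                 break
--         if ok:
--             good.append(r)
--     return good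
-- ===== SOURCE B (Python) =====
-- from math import prod
--
-- WHEEL_PRIMES = (2, 3, 5, 7, 11, 13)
--
-- WHEEL_MOD = prod(WHEEL_PRIMES)
--
-- def admissible_residues(offsets):
--     A = list(offsets)
--     # Precompute, once per prime, the residues x mod p whose square avoids all
--     # forbidden offsets; the main scan then does no per-offset work at all.
--     allowed = [(p, [x for x in range(p)
--                     if all((x * x + a) % p != 0 for a in A)])
--                for p in WHEEL_PRIMES]
--     return [r for r in range(WHEEL_MOD)
--             if all(r % p in s for p, s in allowed)]
-- ===== Notes on version B (the rewrite author's own statement) =====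
-- stated objective: faster
-- what changed: B precomputes, once per wheel prime, the list of allowed residues x mod p (those with (x*x+a)%p != 0 for all offsets), so the main scan over the 30030 wheel residues does one small membership test per prime instead of re-scanning the offsets list for every residue and every prime.
import Mathlib
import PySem

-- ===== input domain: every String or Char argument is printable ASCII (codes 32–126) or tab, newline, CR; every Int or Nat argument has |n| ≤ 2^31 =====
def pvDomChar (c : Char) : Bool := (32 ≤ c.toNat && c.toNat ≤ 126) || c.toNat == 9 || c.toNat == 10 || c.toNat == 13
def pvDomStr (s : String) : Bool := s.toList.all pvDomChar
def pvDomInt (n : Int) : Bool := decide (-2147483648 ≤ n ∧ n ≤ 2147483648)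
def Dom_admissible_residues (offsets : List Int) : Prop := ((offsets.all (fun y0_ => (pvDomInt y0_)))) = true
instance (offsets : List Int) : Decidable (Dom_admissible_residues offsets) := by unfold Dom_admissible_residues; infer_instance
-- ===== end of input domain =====

-- B precomputes per-prime allowed residue lists once, so the main scan over the wheel does one
-- membership test per prime instead of re-scanning the offsets list for every residue and prime
-- (objective: faster — the per-offset work leaves the O(30030)-iteration main loop).

-- ===== PORT A =====
def wheelPrimes : List Int := [2, 3, 5, 7, 11, 13]

def wheelMod : Int := 30030  -- prod(WHEEL_PRIMES)

-- 'for a in A: if (rp2 + a) % p == 0: ok = False; break' — returns the final ok flag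
def pvInnerA (rp2 p : Int) : List Int → Bool
  | [] => true
  | a :: t => if PySem.Int.mod (rp2 + a) p == 0 then false else pvInnerA rp2 p t

-- 'for p in WHEEL_PRIMES: …; if not ok: break' — returns the final ok flag
def pvMidA (r : Int) (as : List Int) : List Int → Bool
  | [] => true
  | p :: t => if pvInnerA (PySem.Int.mod (r * r) p) p as then pvMidA r as t else false

def admissible_residues (offsets : List Int) : List Int :=
  (PySem.List.pyRange 0 wheelMod 1).foldl
    (fun good r => if pvMidA r offsets wheelPrimes then good ++ [r] else good) []

-- ===== PORT B =====
-- [x for x in range(p) if all((x*x + a) % p != 0 for a in A)]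
def pvAllowedFor (p : Int) (as : List Int) : List Int :=
  (PySem.List.pyRange 0 p 1).filter
    (fun x => as.all (fun a => !(PySem.Int.mod (x * x + a) p == 0)))

def admissible_residues_alt (offsets : List Int) : List Int :=
  let allowed := wheelPrimes.map (fun p => (p, pvAllowedFor p offsets))
  (PySem.List.pyRange 0 wheelMod 1).filter
    (fun r => allowed.all (fun ps => ps.2.contains (PySem.Int.mod r ps.1)))

-- ===== PRECONDITION & SPEC =====
def Spec_admissible_residues (offsets : List Int) (out : List Int) : Prop := out = admissible_residues_alt offsets
instance (offsets : List Int) (out : List Int) : Decidable (Spec_admissible_residues offsets out) := by unfold Spec_admissible_residues; infer_instance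

-- ===== CLAIM (what is proved, stated in full; the proofs are below) =====
def Claim_equal_admissible_residues : Prop := ∀ (offsets : List Int), Dom_admissible_residues offsets → Spec_admissible_residues offsets (admissible_residues offsets)

-- ===== LEMMAS AND PROOFS =====

theorem pvInnerA_eq_all (rp2 p : Int) (as : List Int) :
    pvInnerA rp2 p as = as.all (fun a => !(PySem.Int.mod (rp2 + a) p == 0)) := by
  induction as with
  | nil => rfl
  | cons a t ih => simp only [pvInnerA, List.all_cons]; split_ifs with h <;> simp [h, ih]

theorem pvMidA_eq_all (r : Int) (as ps : List Int) :
    pvMidA r as ps = ps.all (fun p => pvInnerA (PySem.Int.mod (r * r) p) p as) := by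
  induction ps with
  | nil => rfl
  | cons p t ih => simp only [pvMidA, List.all_cons]; split_ifs with h <;> simp [h, ih]

-- the per-prime key fact: membership of r % p in the precomputed list is A's inner check
theorem pvContains_allowedFor (p : Int) (hp : 0 < p) (r : Int) (as : List Int) :
    (pvAllowedFor p as).contains (PySem.Int.mod r p)
      = as.all (fun a => !(PySem.Int.mod (PySem.Int.mod (r * r) p + a) p == 0)) := by
  have hmem : PySem.Int.mod r p ∈ PySem.List.pyRange 0 p 1 := by
    rw [PySem.List.mem_pyRange_one]
    exact ⟨PySem.Int.mod_nonneg r hp, PySem.Int.mod_lt r hp⟩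
  have hkey : ∀ a : Int,
      PySem.Int.mod (PySem.Int.mod r p * PySem.Int.mod r p + a) p
        = PySem.Int.mod (PySem.Int.mod (r * r) p + a) p := by
    intro a
    simp only [PySem.Int.mod_eq_emod_of_pos hp]
    conv_lhs => rw [Int.add_emod, ← Int.mul_emod, ← Int.add_emod]
    conv_rhs => rw [Int.add_emod, Int.emod_emod_of_dvd _ dvd_rfl, ← Int.add_emod]
  simp only [pvAllowedFor, List.contains_eq_mem, List.mem_filter, hmem, true_and,
    Bool.decide_eq_true]
  simp only [hkey]

theorem admissible_residues_spec : Claim_equal_admissible_residues := by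
  intro offsets _
  show admissible_residues offsets = admissible_residues_alt offsets
  rw [admissible_residues, PySem.List.foldl_append_if_eq_filter, List.nil_append,
    admissible_residues_alt]
  apply List.filter_congr
  intro r _
  rw [pvMidA_eq_all]
  simp only [List.all_map]
  rw [show wheelPrimes = [2,3,5,7,11,13] from rfl]
  simp only [List.all_cons, List.all_nil, Function.comp, pvInnerA_eq_all,
    pvContains_allowedFor 2 (by norm_num) r offsets,
    pvContains_allowedFor 3 (by norm_num) r offsets,
    pvContains_allowedFor 5 (by norm_num) r offsets,
    pvContains_allowedFor 7 (by norm_num) r offsets,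
    pvContains_allowedFor 11 (by norm_num) r offsets,
    pvContains_allowedFor 13 (by norm_num) r offsets]
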